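-- pv_equiv track=rewrite | github.com/James-Makoto/EO-CN | EOU2/check_tbl.py | find_quote_problems
-- ===== SOURCE A (Python) =====
-- def find_quote_problems(text):
--     """查找文本中的引号问题"""
--     problems = []
--
--     # 检查未闭合的引号
--     in_quote = False
--     escape_next = False
--
--     for i, char in enumerate(text):
--         if escape_next:
--             escape_next = False
--             continue
--
--         if char == '\\':
--             escape_next = True
--             continue
--
--         if char == '"':
--             if in_quote:
--                 in_quote = False
--             else:
--                 in_quote = True
--
--     if in_quote:
--         problems.append("存在未闭合的引号")
--
--     # 检查是否有单独的引号（不是成对出现）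
--     clean_text = text.replace('\\"', '')
--     quote_count = clean_text.count('"')
--     if quote_count % 2 != 0:
--         problems.append(f"引号数量为奇数({quote_count})，可能不成对")
--
--     # 检查是否有未转义的引号
--     # 查找所有不在转义序列中的引号
--     for i in range(len(text)):
--         if text[i] == '"':
--             # 检查前面是否有转义符
--             if i == 0 or text[i-1] != '\\':
--                 # 检查是否在字符串边界
--                 problems.append(f"位置{i}: 可能未转义的引号")
--
--     return problems
-- ===== SOURCE B (Python) =====
-- def find_quote_problems(text):
--     """查找文本中的引号问题"""
--     parts = text.split('\\')
--     eff = parts[0].count('"')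
--     positions = [i for i, ch in enumerate(parts[0]) if ch == '"']
--     offset = len(parts[0])
--     esc = False
--     for part in parts[1:]:
--         esc = not esc
--         if esc and part:
--             eff += part.count('"') - (1 if part[0] == '"' else 0)
--             esc = False
--         elif not esc:
--             eff += part.count('"')
--         positions += [offset + 1 + j for j, ch in enumerate(part) if ch == '"' and j > 0]
--         offset += 1 + len(part)
--     problems = []
--     if eff % 2 == 1:
--         problems.append("存在未闭合的引号")
--     if len(positions) % 2 != 0:
--         problems.append(f"引号数量为奇数({len(positions)})，可能不成对")
--     problems += [f"位置{i}: 可能未转义的引号" for i in positions]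
--     return problems
-- ===== Notes on version B (the rewrite author's own statement) =====
-- stated objective: alternative
-- what changed: B splits the text on backslashes and works per chunk: quote positions are the quote indices inside chunks (skipping a chunk's first character, which is backslash-escaped), and the unclosed-quote parity comes from per-chunk quote counts with a one-bit escape flag carried across chunks (empty chunks encode backslash runs), replacing A's per-character escape state machine, its replace-then-count rescan and its index loop.
import Mathlib
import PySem

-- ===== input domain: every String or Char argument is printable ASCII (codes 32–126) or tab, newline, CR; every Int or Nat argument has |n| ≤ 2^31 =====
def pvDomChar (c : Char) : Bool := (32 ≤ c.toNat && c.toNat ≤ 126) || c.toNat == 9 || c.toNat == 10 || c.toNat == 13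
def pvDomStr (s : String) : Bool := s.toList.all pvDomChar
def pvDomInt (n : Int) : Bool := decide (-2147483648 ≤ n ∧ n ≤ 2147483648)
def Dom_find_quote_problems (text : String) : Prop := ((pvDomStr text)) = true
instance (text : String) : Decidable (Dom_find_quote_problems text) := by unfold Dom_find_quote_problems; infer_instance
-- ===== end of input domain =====

-- B replaces A's per-character passes by a split on backslashes: quote positions are chunk-internal
-- quote indices (a chunk's first character is escaped), parity comes from per-chunk counts (objective: alternative).
-- ===== PORT A =====
def find_quote_problems (text : String) : List String :=
  let cs := text.toList
  -- pass 1: unclosed-quote state machine over enumerate(text)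
  let st := (PySem.List.enumerate cs 0).foldl
    (fun (s : Bool × Bool) (p : Int × Char) =>
      if s.2 then (s.1, false)
      else if p.2 == '\\' then (s.1, true)
      else if p.2 == '"' then (if s.1 then (false, s.2) else (true, s.2))
      else s)
    (false, false)
  let problems : List String := if st.1 then ["存在未闭合的引号"] else []
  -- pass 2: clean_text = text.replace('\\"', ''); quote_count = clean_text.count('"')
  let clean_text := PySem.Chars.replace cs ['\\', '"'] []
  let quote_count : Nat := PySem.Chars.count clean_text ['"']
  let problems := if quote_count % 2 ≠ 0 then
      problems ++ ["引号数量为奇数(" ++ PySem.Int.toStr (quote_count : Int) ++ ")，可能不成对"]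
    else problems
  -- pass 3: for i in range(len(text)) report unescaped quotes (text[i] is in range throughout)
  let problems := (PySem.List.pyRange 0 (cs.length : Int) 1).foldl
    (fun acc i =>
      if PySem.List.pyGetD cs i ' ' == '"' then
        if i == 0 || PySem.List.pyGetD cs (i - 1) ' ' != '\\' then
          acc ++ ["位置" ++ PySem.Int.toStr i ++ ": 可能未转义的引号"]
        else acc
      else acc)
    problems
  problems

-- ===== PORT B =====
def find_quote_problems_alt (text : String) : List String :=
  let cs := text.toList
  let parts := PySem.Chars.splitOn cs ['\\']
  let p0 := parts.headD []
  -- state: (eff, positions, offset, esc); parts[1:] folded with the separator handling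
  let st : Int × List Int × Int × Bool := parts.tail.foldl
    (fun (s : Int × List Int × Int × Bool) (part : List Char) =>
      let esc := !s.2.2.2
      let eb : Int × Bool :=
        if esc && !part.isEmpty then
          (s.1 + (PySem.Chars.count part ['"'] : Int) -
            (if part.headD ' ' == '"' then 1 else 0), false)
        else if !esc then (s.1 + (PySem.Chars.count part ['"'] : Int), esc)
        else (s.1, esc)
      let pos := s.2.1 ++ ((PySem.List.enumerate part 0).filter
          (fun q => q.2 == '"' && decide (0 < q.1))).map (fun q => s.2.2.1 + 1 + q.1)
      (eb.1, pos, s.2.2.1 + 1 + (part.length : Int), eb.2))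
    ((PySem.Chars.count p0 ['"'] : Int),
     ((PySem.List.enumerate p0 0).filter (fun q => q.2 == '"')).map (fun q => q.1),
     (p0.length : Int), false)
  let problems : List String := if st.1 % 2 == 1 then ["存在未闭合的引号"] else []
  let problems := if st.2.1.length % 2 ≠ 0 then
      problems ++ ["引号数量为奇数(" ++ PySem.Int.toStr (st.2.1.length : Int) ++ ")，可能不成对"]
    else problems
  problems ++ st.2.1.map (fun i => "位置" ++ PySem.Int.toStr i ++ ": 可能未转义的引号")

-- ===== PRECONDITION & SPEC =====
def Spec_find_quote_problems (text : String) (out : List String) : Prop := out = find_quote_problems_alt text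
instance (text : String) (out : List String) : Decidable (Spec_find_quote_problems text out) := by unfold Spec_find_quote_problems; infer_instance

-- ===== CLAIM (what is proved, stated in full; the proofs are below) =====
def Claim_equal_find_quote_problems : Prop := ∀ (text : String), Dom_find_quote_problems text → Spec_find_quote_problems text (find_quote_problems text)

-- ===== LEMMAS AND PROOFS =====

-- the per-character machine of A's first pass
def pvStep (s : Bool × Bool) (c : Char) : Bool × Bool :=
  if s.2 then (s.1, false)
  else if c == '\\' then (s.1, true)
  else if c == '"' then (!s.1, s.2)
  else s

-- positions of quotes whose previous character is not a backslash (prev-char semantics of passes 2/3)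
def pvPos (i : Int) (p : Option Char) : List Char → List Int
  | [] => []
  | c :: t => (if c == '"' && p != some '\\' then [i] else []) ++ pvPos (i + 1) (some c) t

-- text with the non-overlapping occurrences of \" removed (A's pass 2)
def pvRem : List Char → List Char
  | [] => []
  | [c] => [c]
  | c :: d :: t => if c = '\\' ∧ d = '"' then pvRem t else c :: pvRem (d :: t)

-- the split of the text on backslashes, structurally
def pvParts : List Char → List (List Char)
  | [] => [[]]
  | c :: t => if c = '\\' then [] :: pvParts t else (pvParts t).modifyHead (c :: ·)

-- number of machine toggles from escape state e
def pvTog : Bool → List Char → Nat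
  | _, [] => 0
  | true, _ :: t => pvTog false t
  | false, c :: t =>
      if c = '\\' then pvTog true t else if c = '"' then pvTog false t + 1 else pvTog false t

-- final escape state of the machine from escape state e
def pvEsc : Bool → List Char → Bool
  | e, [] => e
  | true, _ :: t => pvEsc false t
  | false, c :: t => pvEsc (if c = '\\' then true else false) t

-- last char of l, or prev if l is empty
def pvLastOr (prev : Option Char) (l : List Char) : Option Char :=
  l.foldl (fun _ c => some c) prev

theorem pv_enum_foldl {β : Type} (g : β → Char → β) (cs : List Char) : ∀ (i : Int) (b : β),
    (PySem.List.enumerate cs i).foldl (fun s p => g s p.2) b = cs.foldl g b := by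
  induction cs with
  | nil => intro i b; simp [PySem.List.enumerate]
  | cons c t ih => intro i b; rw [PySem.List.enumerate_cons]; simp only [List.foldl_cons]; exact ih _ _

theorem pvA_fold (cs : List Char) : ∀ (i : Int) (q e : Bool),
    (PySem.List.enumerate cs i).foldl
      (fun (s : Bool × Bool) (p : Int × Char) =>
        if s.2 then (s.1, false)
        else if p.2 == '\\' then (s.1, true)
        else if p.2 == '"' then (if s.1 then (false, s.2) else (true, s.2))
        else s)
      (q, e)
    = cs.foldl pvStep (q, e) := by
  intro i q e
  rw [pv_enum_foldl (fun (s : Bool × Bool) (c : Char) =>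
        if s.2 then (s.1, false)
        else if c == '\\' then (s.1, true)
        else if c == '"' then (if s.1 then (false, s.2) else (true, s.2))
        else s) cs i (q, e)]
  have hfun : (fun (s : Bool × Bool) (c : Char) =>
        if s.2 then (s.1, false)
        else if c == '\\' then (s.1, true)
        else if c == '"' then (if s.1 then (false, s.2) else (true, s.2))
        else s) = pvStep := by
    funext s c; obtain ⟨q', e'⟩ := s; cases q' <;> rfl
  rw [hfun]

theorem pvPosLen_eq (l : List Char) : ∀ (i j : Int) (p q : Option Char),
    (p = some '\\' ↔ q = some '\\') → (pvPos i p l).length = (pvPos j q l).length := by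
  induction l with
  | nil => intro i j p q _; simp [pvPos]
  | cons c t ih =>
    intro i j p q h
    simp only [pvPos, List.length_append]
    rw [ih (i+1) (j+1) (some c) (some c) Iff.rfl]
    congr 1
    have : (p != some '\\') = (q != some '\\') := by
      by_cases hp : p = some '\\'
      · simp [hp, h.mp hp]
      · have hq : ¬ q = some '\\' := fun hq => hp (h.mpr hq)
        have h1 : (p != some '\\') = true := by rw [bne_iff_ne]; exact hp
        have h2 : (q != some '\\') = true := by rw [bne_iff_ne]; exact hq
        rw [h1, h2]
    rw [this]
    split_ifs <;> rfl

theorem pvRem_count (l : List Char) : (pvRem l).count '"' = (pvPos 0 none l).length := by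
  induction l using pvRem.induct with
  | case1 => simp [pvRem, pvPos]
  | case2 c => by_cases hc : c = '"' <;> simp [pvRem, pvPos, hc]
  | case3 c d t h ih =>
    obtain ⟨hc, hd⟩ := h
    subst hc; subst hd
    rw [show pvRem ('\\' :: '"' :: t) = pvRem t from by simp [pvRem], ih]
    simp only [pvPos]
    simp
    exact pvPosLen_eq t 0 2 none (some '"') (by simp)
  | case4 c d t h ih =>
    rw [show pvRem (c :: d :: t) = c :: pvRem (d :: t) from by simp [pvRem, h]]
    rw [List.count_cons, ih]
    have hkey : (pvPos (0+1) (some c) (d :: t)).length = (pvPos 0 none (d :: t)).length := by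
      by_cases hc : c = '\\'
      · subst hc
        have hd : ¬ d = '"' := fun hd => h ⟨rfl, hd⟩
        simp only [pvPos, List.length_append]
        rw [pvPosLen_eq t (0+1+1) (0+1) (some d) (some d) Iff.rfl]
        congr 1
        have h1 : (d == '"' && some '\\' != some '\\') = false := by simp
        have h2 : (d == '"' && (none : Option Char) != some '\\') = false := by simp [hd]
        rw [h1, h2]
        simp
      · exact pvPosLen_eq (d :: t) (0+1) 0 (some c) none (by simp [hc])
    conv_rhs => rw [pvPos]
    rw [List.length_append, hkey]
    by_cases hc : c = '"' <;> simp [hc, Nat.add_comm]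

theorem pvCount_go (l : List Char) : ∀ (fuel acc : Nat), l.length ≤ fuel →
    PySem.Chars.count.go ['"'] fuel l acc = acc + l.count '"' := by
  induction l with
  | nil => intro fuel acc h; cases fuel <;> simp [PySem.Chars.count.go]
  | cons c t ih =>
    intro fuel acc h
    cases fuel with
    | zero => simp at h
    | succ f =>
      rw [PySem.Chars.count.go]
      by_cases hc : (['"'] : List Char).isPrefixOf (c :: t)
      · have hc' : c = '"' := ((by simpa [List.isPrefixOf] using hc : ('"':Char) = c)).symm
        rw [if_pos hc]
        show PySem.Chars.count.go ['"'] f t (acc + 1) = acc + (c :: t).count '"'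
        rw [ih f (acc + 1) (by simp at h; omega)]
        simp [hc']
        omega
      · have hc' : ¬ c = '"' := fun h' => hc (by simp [List.isPrefixOf, h'])
        rw [if_neg hc, ih f acc (by simp at h; omega)]
        simp [hc']

theorem pvCount_quote (l : List Char) : PySem.Chars.count l ['"'] = l.count '"' := by
  rw [PySem.Chars.count]
  simp only [List.isEmpty_cons, Bool.false_eq_true, if_false]
  rw [pvCount_go l l.length 0 le_rfl]
  simp

theorem pvReplace_go (l : List Char) : ∀ (fuel : Nat) (acc : List Char), l.length ≤ fuel →
    PySem.Chars.replace.go ['\\', '"'] [] fuel l acc = acc.reverse ++ pvRem l := by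
  induction l using pvRem.induct with
  | case1 => intro fuel acc h; cases fuel <;> simp [PySem.Chars.replace.go, pvRem]
  | case2 c =>
    intro fuel acc h
    cases fuel with
    | zero => simp at h
    | succ f =>
      rw [PySem.Chars.replace.go]
      have hnp : ¬ (['\\', '"'] : List Char).isPrefixOf [c] := by simp [List.isPrefixOf]
      rw [if_neg hnp]
      show PySem.Chars.replace.go ['\\', '"'] [] f [] (c :: acc) = acc.reverse ++ pvRem [c]
      cases f <;> simp [PySem.Chars.replace.go, pvRem]
  | case3 c d t hcd ih =>
    intro fuel acc h
    obtain ⟨hc, hd⟩ := hcd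
    subst hc; subst hd
    cases fuel with
    | zero => simp at h
    | succ f =>
      rw [PySem.Chars.replace.go]
      have hp : (['\\', '"'] : List Char).isPrefixOf ('\\' :: '"' :: t) := by simp [List.isPrefixOf]
      rw [if_pos hp]
      show PySem.Chars.replace.go ['\\', '"'] [] f t acc = acc.reverse ++ pvRem ('\\' :: '"' :: t)
      rw [ih f acc (by simp at h; omega)]
      simp [pvRem]
  | case4 c d t hcd ih =>
    intro fuel acc h
    cases fuel with
    | zero => simp at h
    | succ f =>
      rw [PySem.Chars.replace.go]
      have hnp : ¬ (['\\', '"'] : List Char).isPrefixOf (c :: d :: t) := by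
        simp [List.isPrefixOf]; intro h1 h2; exact hcd ⟨h1.symm, h2.symm⟩
      rw [if_neg hnp]
      show PySem.Chars.replace.go ['\\', '"'] [] f (d :: t) (c :: acc) = acc.reverse ++ pvRem (c :: d :: t)
      rw [ih f (c :: acc) (by simp at h ⊢; omega)]
      simp [pvRem, hcd]

theorem pvReplace_eq_rem (cs : List Char) : PySem.Chars.replace cs ['\\', '"'] [] = pvRem cs := by
  rw [PySem.Chars.replace]
  simp only [List.isEmpty_cons, Bool.false_eq_true, if_false]
  rw [pvReplace_go cs cs.length [] le_rfl]
  simp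

theorem pvA3_fold (cs : List Char) : ∀ (suf pre : List Char) (acc : List String), cs = pre ++ suf →
    (PySem.List.pyRange (pre.length : Int) (cs.length : Int) 1).foldl
      (fun acc i =>
        if PySem.List.pyGetD cs i ' ' == '"' then
          if i == 0 || PySem.List.pyGetD cs (i - 1) ' ' != '\\' then
            acc ++ ["位置" ++ PySem.Int.toStr i ++ ": 可能未转义的引号"]
          else acc
        else acc)
      acc
    = acc ++ (pvPos (pre.length : Int) pre.getLast? suf).map
        (fun i => "位置" ++ PySem.Int.toStr i ++ ": 可能未转义的引号") := by
  intro suf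
  induction suf with
  | nil =>
    intro pre acc h
    subst h
    rw [PySem.List.pyRange_one_eq_nil (by simp)]
    simp [pvPos]
  | cons c t ih =>
    intro pre acc h
    subst h
    have hlt : (pre.length : Int) < ((pre ++ c :: t).length : Int) := by simp
    rw [PySem.List.pyRange_one_cons hlt]
    simp only [List.foldl_cons]
    have hlen : (pre.length : Int) + 1 = (((pre ++ [c]).length : Nat) : Int) := by simp
    rw [hlen, ih (pre ++ [c]) _ (by simp)]
    have hget : PySem.List.pyGetD (pre ++ c :: t) (pre.length : Int) ' ' = c := by
      rw [PySem.List.pyGetD_natCast]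
      simp [List.getD]
    have hcond : ((pre.length : Int) == 0 ||
        PySem.List.pyGetD (pre ++ c :: t) ((pre.length : Int) - 1) ' ' != '\\')
        = (pre.getLast? != some '\\') := by
      rcases List.eq_nil_or_concat pre with rfl | ⟨pr, b, rfl⟩
      · simp
      · simp only [List.concat_eq_append] at *
        have h1 : ((((pr ++ [b]).length : Nat) : Int) == 0) = false := by
          rw [beq_eq_false_iff_ne]
          simp
          omega
        have h2 : (((pr ++ [b]).length : Nat) : Int) - 1 = ((pr.length : Nat) : Int) := by simp
        have h3 : PySem.List.pyGetD ((pr ++ [b]) ++ c :: t) ((pr.length : Nat) : Int) ' ' = b := by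
          rw [PySem.List.pyGetD_natCast]
          simp [List.getD]
        rw [h1, h2, h3]
        have h4 : (pr ++ [b]).getLast? = some b := by simp
        rw [h4]
        by_cases hb : b = '\\'
        · simp [hb]
        · have e1 : (b != '\\') = true := by rw [bne_iff_ne]; exact hb
          have e2 : (some b != some '\\') = true := by rw [bne_iff_ne]; simp [hb]
          rw [e1, e2]
          rfl
    simp only [hget, hcond]
    have hlast : (pre ++ [c]).getLast? = some c := by simp
    rw [hlast]
    conv_rhs => rw [pvPos]
    rw [List.map_append, ← List.append_assoc]
    congr 1
    by_cases hc : c = '"' <;> by_cases hl : (pre.getLast? != some '\\') = true <;>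
      simp [hc, hl]
    rw [← hlen]

theorem pvA3_fold0 (cs : List Char) (acc : List String) :
    (PySem.List.pyRange 0 (cs.length : Int) 1).foldl
      (fun acc i =>
        if PySem.List.pyGetD cs i ' ' == '"' then
          if i == 0 || PySem.List.pyGetD cs (i - 1) ' ' != '\\' then
            acc ++ ["位置" ++ PySem.Int.toStr i ++ ": 可能未转义的引号"]
          else acc
        else acc)
      acc
    = acc ++ (pvPos 0 none cs).map
        (fun i => "位置" ++ PySem.Int.toStr i ++ ": 可能未转义的引号") := by
  have h := pvA3_fold cs cs [] acc rfl
  simpa using h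

-- machine fold = (toggle parity, final escape state)
theorem pvStep_fold (l : List Char) : ∀ (q e : Bool),
    l.foldl pvStep (q, e) = (xor q (decide (pvTog e l % 2 = 1)), pvEsc e l) := by
  induction l with
  | nil => intro q e; simp [pvTog, pvEsc]
  | cons c t ih =>
    intro q e
    cases e with
    | true => simp only [List.foldl_cons, pvStep]; rw [ih]; simp [pvTog, pvEsc]
    | false =>
      by_cases hc : c = '\\'
      · subst hc
        simp only [List.foldl_cons, pvStep]
        norm_num
        rw [ih]
        simp [pvTog, pvEsc]
      · by_cases hq : c = '"'
        · subst hq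
          simp only [List.foldl_cons, pvStep]
          norm_num [hc]
          rw [ih]
          have : (decide (pvTog false t % 2 = 1)) = !(decide ((pvTog false t + 1) % 2 = 1)) := by
            rcases Nat.even_or_odd (pvTog false t) with h | h <;>
              simp [Nat.even_iff, Nat.odd_iff] at h <;>
              simp [h, Nat.add_mod, Nat.succ_mod_two_eq_one_iff]
          have htog : pvTog false ('\"' :: t) = pvTog false t + 1 := by simp [pvTog, hc]
          have hescq : pvEsc false ('\"' :: t) = pvEsc false t := by simp [pvEsc, hc]
          rw [htog, hescq, this]
          cases q <;> simp
        · simp only [List.foldl_cons, pvStep]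
          norm_num [hc, hq]
          rw [ih]
          simp [pvTog, pvEsc, hc, hq]

theorem pvTog_append (l1 l2 : List Char) : ∀ e, pvTog e (l1 ++ l2) = pvTog e l1 + pvTog (pvEsc e l1) l2 := by
  induction l1 with
  | nil => intro e; simp [pvTog, pvEsc]
  | cons c t ih =>
    intro e
    cases e with
    | true => simp only [List.cons_append, pvTog, pvEsc]; exact ih false
    | false =>
      by_cases hc : c = '\\'
      · subst hc; simp only [List.cons_append, pvTog, pvEsc, if_pos rfl]; exact ih true
      · by_cases hq : c = '"' <;> simp only [List.cons_append, pvTog, pvEsc, if_neg hc] <;>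
          simp [hq, ih false, Nat.add_comm, Nat.add_assoc, Nat.add_left_comm]

theorem pvEsc_append (l1 l2 : List Char) : ∀ e, pvEsc e (l1 ++ l2) = pvEsc (pvEsc e l1) l2 := by
  induction l1 with
  | nil => intro e; simp [pvEsc]
  | cons c t ih =>
    intro e
    cases e with
    | true => simp only [List.cons_append, pvEsc]; exact ih false
    | false => simp only [List.cons_append, pvEsc]; exact ih _

theorem pvPos_append (l1 l2 : List Char) : ∀ (i : Int) (p : Option Char),
    pvPos i p (l1 ++ l2) = pvPos i p l1 ++ pvPos (i + l1.length) (pvLastOr p l1) l2 := by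
  induction l1 with
  | nil => intro i p; simp [pvPos, pvLastOr]
  | cons c t ih =>
    intro i p
    simp only [List.cons_append, pvPos, ih (i+1) (some c)]
    have : pvLastOr p (c :: t) = pvLastOr (some c) t := by simp [pvLastOr]
    rw [this, List.append_assoc]
    congr 3
    simp
    ring

-- backslash-free chunk facts
theorem pvTog_false_bsfree (p : List Char) (h : '\\' ∉ p) : pvTog false p = p.count '"' := by
  induction p with
  | nil => simp [pvTog]
  | cons c t ih =>
    have hc : ¬ c = '\\' := fun hc => h (hc ▸ List.mem_cons_self)
    have ht : '\\' ∉ t := fun hm => h (List.mem_cons_of_mem _ hm)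
    by_cases hq : c = '"' <;> simp [pvTog, hc, hq, ih ht, List.count_cons]

theorem pvEsc_false_bsfree (p : List Char) (h : '\\' ∉ p) : pvEsc false p = false := by
  induction p with
  | nil => simp [pvEsc]
  | cons c t ih =>
    have hc : ¬ c = '\\' := fun hc => h (hc ▸ List.mem_cons_self)
    have ht : '\\' ∉ t := fun hm => h (List.mem_cons_of_mem _ hm)
    simp [pvEsc, hc, ih ht]

theorem pvPosE_all (p : List Char) (h : '\\' ∉ p) : ∀ (i s : Int) (prev : Option Char), prev ≠ some '\\' →
    pvPos i prev p
      = ((PySem.List.enumerate p s).filter (fun x => x.2 == '"')).map (fun x => i - s + x.1) := by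
  induction p with
  | nil => intro i s prev _; simp [pvPos, PySem.List.enumerate]
  | cons c t ih =>
    intro i s prev hprev
    have hc : ¬ c = '\\' := fun hc => h (hc ▸ List.mem_cons_self)
    have ht : '\\' ∉ t := fun hm => h (List.mem_cons_of_mem _ hm)
    rw [PySem.List.enumerate_cons]
    simp only [pvPos, List.filter_cons]
    rw [ih ht (i+1) (s+1) (some c) (by simp [hc])]
    have hpr : (prev != some '\\') = true := by rw [bne_iff_ne]; exact hprev
    have harith : (fun (x : Int × Char) => i + 1 - (s + 1) + x.1) = (fun x => i - s + x.1) := by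
      funext x; ring_nf
    rw [harith]
    by_cases hq : c = '"' <;> simp [hq, hpr] <;> ring_nf

theorem pvPosE_esc (p : List Char) (h : '\\' ∉ p) : ∀ (i s : Int),
    pvPos i (some '\\') p
      = ((PySem.List.enumerate p s).filter (fun x => x.2 == '"' && decide (s < x.1))).map
          (fun x => i - s + x.1) := by
  intro i s
  cases p with
  | nil => simp [pvPos, PySem.List.enumerate]
  | cons c t =>
    have hc : ¬ c = '\\' := fun hc => h (hc ▸ List.mem_cons_self)
    have ht : '\\' ∉ t := fun hm => h (List.mem_cons_of_mem _ hm)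
    rw [PySem.List.enumerate_cons]
    simp only [pvPos, List.filter_cons]
    have hdrop : ((c, s).swap.2 == '"' && decide (s < s)) = false := by simp
    have hfil : (PySem.List.enumerate t (s+1)).filter (fun x => x.2 == '"' && decide (s < x.1))
        = (PySem.List.enumerate t (s+1)).filter (fun x => x.2 == '"') := by
      apply List.filter_congr
      intro x hx
      rcases (PySem.List.mem_enumerate_iff _ _ _).mp hx with ⟨k, hk, rfl⟩
      have : s < s + 1 + k := by omega
      simp [this]
    have := pvPosE_all t ht (i+1) (s+1) (some c) (by simp [hc])
    simp only [show (s < s) = False from by simp, decide_false, Bool.and_false]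
    rw [this, hfil]
    have harith : (fun (x : Int × Char) => i + 1 - (s + 1) + x.1) = (fun x => i - s + x.1) := by
      funext x; ring_nf
    rw [harith]
    simp

-- pvParts facts
theorem pvParts_ne_nil (l : List Char) : pvParts l ≠ [] := by
  induction l with
  | nil => simp [pvParts]
  | cons c t ih =>
    by_cases hc : c = '\\'
    · simp [pvParts, hc]
    · simp only [pvParts, if_neg hc]
      cases hps : pvParts t with
      | nil => exact absurd hps ih
      | cons h tl => simp

theorem pvParts_bsfree (l : List Char) : ∀ p ∈ pvParts l, '\\' ∉ p := by
  induction l with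
  | nil => intro p hp; simp [pvParts] at hp; simp [hp]
  | cons c t ih =>
    intro p hp
    by_cases hc : c = '\\'
    · simp only [pvParts, if_pos hc, List.mem_cons] at hp
      rcases hp with rfl | hp
      · simp
      · exact ih p hp
    · simp only [pvParts, if_neg hc] at hp
      cases hps : pvParts t with
      | nil => exact absurd hps (pvParts_ne_nil t)
      | cons h tl =>
        rw [hps] at hp
        simp only [List.modifyHead, List.mem_cons] at hp
        rcases hp with rfl | hp
        · intro hm
          rcases List.mem_cons.mp hm with rfl | hm
          · exact hc rfl
          · exact ih h (hps ▸ List.mem_cons_self) hm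
        · exact ih p (hps ▸ List.mem_cons_of_mem _ hp)

theorem pvParts_recon (l : List Char) :
    (pvParts l).headD [] ++ (((pvParts l).tail.map (fun p => '\\' :: p)).flatten) = l := by
  induction l with
  | nil => simp [pvParts]
  | cons c t ih =>
    by_cases hc : c = '\\'
    · subst hc
      simp only [pvParts, if_pos rfl, List.headD_cons, List.tail_cons, List.nil_append]
      cases hps : pvParts t with
      | nil => exact absurd hps (pvParts_ne_nil t)
      | cons h tl =>
        rw [hps] at ih
        simp only [List.headD_cons, List.tail_cons] at ih
        simp [← ih]
    · simp only [pvParts, if_neg hc]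
      cases hps : pvParts t with
      | nil => exact absurd hps (pvParts_ne_nil t)
      | cons h tl =>
        rw [hps] at ih
        simp only [List.headD_cons, List.tail_cons] at ih ⊢
        simp [List.modifyHead, ih]

theorem pvSplitOn_go (l : List Char) : ∀ (fuel : Nat) (cur : List Char) (acc : List (List Char)),
    l.length ≤ fuel →
    PySem.Chars.splitOn.go ['\\'] fuel l cur acc
      = acc.reverse ++ (pvParts l).modifyHead (cur.reverse ++ ·) := by
  induction l with
  | nil =>
    intro fuel cur acc h
    cases fuel <;> simp [PySem.Chars.splitOn.go, pvParts, List.modifyHead]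
  | cons c t ih =>
    intro fuel cur acc h
    cases fuel with
    | zero => simp at h
    | succ f =>
      rw [PySem.Chars.splitOn.go]
      by_cases hc : c = '\\'
      · subst hc
        have hp : (['\\'] : List Char).isPrefixOf ('\\' :: t) := by simp [List.isPrefixOf]
        rw [if_pos hp]
        show PySem.Chars.splitOn.go ['\\'] f (List.drop 1 ('\\' :: t)) [] (cur.reverse :: acc)
            = acc.reverse ++ (pvParts ('\\' :: t)).modifyHead (cur.reverse ++ ·)
        simp only [List.drop_succ_cons, List.drop_zero]
        rw [ih f [] (cur.reverse :: acc) (by simp at h; omega)]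
        have hid : (pvParts t).modifyHead (([] : List Char).reverse ++ ·) = pvParts t := by
          cases pvParts t <;> simp [List.modifyHead]
        rw [hid]
        simp [pvParts]
      · have hp : ¬ (['\\'] : List Char).isPrefixOf (c :: t) := by
          simp [List.isPrefixOf]; exact fun h' => hc h'.symm
        rw [if_neg hp]
        show PySem.Chars.splitOn.go ['\\'] f t (c :: cur) acc
            = acc.reverse ++ (pvParts (c :: t)).modifyHead (cur.reverse ++ ·)
        rw [ih f (c :: cur) acc (by simp at h; omega)]
        simp only [pvParts, if_neg hc]
        congr 1
        cases pvParts t <;> simp [List.modifyHead]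

theorem pvSplitOn_eq (cs : List Char) : PySem.Chars.splitOn cs ['\\'] = pvParts cs := by
  rw [PySem.Chars.splitOn, pvSplitOn_go cs (cs.length + 1) [] [] (by omega)]
  cases pvParts cs <;> simp [List.modifyHead]

-- B's fold over the later chunks, against the machine/positions of the separator-prefixed flattening
theorem pvB_main (ps : List (List Char)) (hbs : ∀ p ∈ ps, '\\' ∉ p) :
    ∀ (eff off : Int) (pos : List Int) (esc : Bool) (prev : Option Char),
    ps.foldl
      (fun (s : Int × List Int × Int × Bool) (part : List Char) =>
        let esc := !s.2.2.2
        let eb : Int × Bool :=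
          if esc && !part.isEmpty then
            (s.1 + (PySem.Chars.count part ['"'] : Int) -
              (if part.headD ' ' == '"' then 1 else 0), false)
          else if !esc then (s.1 + (PySem.Chars.count part ['"'] : Int), esc)
          else (s.1, esc)
        let pos := s.2.1 ++ ((PySem.List.enumerate part 0).filter
            (fun q => q.2 == '"' && decide (0 < q.1))).map (fun q => s.2.2.1 + 1 + q.1)
        (eb.1, pos, s.2.2.1 + 1 + (part.length : Int), eb.2))
      (eff, pos, off, esc)
    = (eff + (pvTog esc ((ps.map (fun p => '\\' :: p)).flatten) : Int),
       pos ++ pvPos off prev ((ps.map (fun p => '\\' :: p)).flatten),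
       off + (((ps.map (fun p => '\\' :: p)).flatten).length : Int),
       pvEsc esc ((ps.map (fun p => '\\' :: p)).flatten)) := by
  induction ps with
  | nil => intro eff off pos esc prev; simp [pvTog, pvEsc, pvPos]
  | cons p rest ih =>
    intro eff off pos esc prev
    have hp : '\\' ∉ p := hbs p List.mem_cons_self
    have hrest : ∀ q ∈ rest, '\\' ∉ q := fun q hq => hbs q (List.mem_cons_of_mem _ hq)
    simp only [List.foldl_cons, List.map_cons, List.flatten_cons]
    rw [ih hrest _ _ _ _ (pvLastOr prev ('\\' :: p))]
    -- separator-prefixed chunk facts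
    have htog : pvTog esc ('\\' :: p) = pvTog (!esc) p := by cases esc <;> simp [pvTog]
    have hesc : pvEsc esc ('\\' :: p) = pvEsc (!esc) p := by cases esc <;> simp [pvEsc]
    have htogapp : pvTog esc (('\\' :: p) ++ ((rest.map (fun p => '\\' :: p)).flatten))
        = pvTog (!esc) p + pvTog (pvEsc (!esc) p) ((rest.map (fun p => '\\' :: p)).flatten) := by
      rw [pvTog_append, htog, hesc]
    have hescapp : pvEsc esc (('\\' :: p) ++ ((rest.map (fun p => '\\' :: p)).flatten))
        = pvEsc (pvEsc (!esc) p) ((rest.map (fun p => '\\' :: p)).flatten) := by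
      rw [pvEsc_append, hesc]
    have hposapp : pvPos off prev (('\\' :: p) ++ ((rest.map (fun p => '\\' :: p)).flatten))
        = pvPos (off + 1) (some '\\') p
          ++ pvPos (off + (('\\' :: p).length : Int)) (pvLastOr prev ('\\' :: p))
              ((rest.map (fun p => '\\' :: p)).flatten) := by
      rw [pvPos_append]
      simp [pvPos]
    -- the step's eff/esc against pvTog/pvEsc on !esc over a backslash-free p
    have heff : ∀ (E : Int),
        (if (!esc) && !p.isEmpty then
            (E + (PySem.Chars.count p ['"'] : Int) - (if p.headD ' ' == '"' then 1 else 0), false)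
          else if !(!esc) then (E + (PySem.Chars.count p ['"'] : Int), !esc)
          else (E, !esc))
        = (E + (pvTog (!esc) p : Int), pvEsc (!esc) p) := by
      intro E
      rw [pvCount_quote]
      cases esc with
      | true =>
        simp only [Bool.not_true, Bool.not_false]
        rw [if_neg (by simp), if_pos (by simp)]
        rw [pvTog_false_bsfree p hp, pvEsc_false_bsfree p hp]
      | false =>
        simp only [Bool.not_false]
        cases p with
        | nil =>
          rw [if_neg (by simp), if_neg (by simp)]
          simp [pvTog, pvEsc]
        | cons c t =>
          have ht : '\\' ∉ t := fun hm => hp (List.mem_cons_of_mem _ hm)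
          rw [if_pos (by simp)]
          have h1 : pvTog true (c :: t) = t.count '"' := by
            simp [pvTog, pvTog_false_bsfree t ht]
          have h2 : pvEsc true (c :: t) = false := by
            simp [pvEsc, pvEsc_false_bsfree t ht]
          rw [h1, h2, List.count_cons]
          by_cases hq : c = '"' <;> simp [hq, List.headD] <;> push_cast <;> ring
    -- the step's positions against pvPos on (off+1, some '\\')
    have hpos : ((PySem.List.enumerate p 0).filter
          (fun q => q.2 == '"' && decide (0 < q.1))).map (fun q => off + 1 + q.1)
        = pvPos (off + 1) (some '\\') p := by
      rw [pvPosE_esc p hp (off + 1) 0]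
      congr 1
      funext x
      ring_nf
    simp only [heff, hpos, htogapp, hescapp, hposapp, Prod.mk.injEq]
    refine ⟨by push_cast; ring, ?_, by simp; push_cast; ring, trivial⟩
    rw [List.append_assoc]
    have harith : off + (('\\' :: p).length : Int) = off + 1 + (p.length : Int) := by
      simp; ring
    rw [harith]

-- int parity of a natural count
theorem pvParity (n : Nat) : (((n : Int) % 2 == 1) : Bool) = decide (n % 2 = 1) := by
  by_cases h : n % 2 = 1
  · have : (n : Int) % 2 = 1 := by omega
    simp [h, this]
  · have : ¬ ((n : Int) % 2 = 1) := by omega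
    simp [h, this]

-- ===== VERDICT (by name: the statement is the Claim_ definition above) =====
theorem find_quote_problems_spec : Claim_equal_find_quote_problems := by
  intro text _
  unfold Spec_find_quote_problems find_quote_problems find_quote_problems_alt
  dsimp only
  rw [pvA_fold, pvReplace_eq_rem, pvCount_quote, pvRem_count, pvA3_fold0, pvSplitOn_eq]
  rw [pvStep_fold]
  set cs := text.toList with hcs
  -- decompose cs through its backslash split
  have hne := pvParts_ne_nil cs
  obtain ⟨p0, ps, hps⟩ : ∃ p0 ps, pvParts cs = p0 :: ps := by
    cases h : pvParts cs with
    | nil => exact absurd h hne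
    | cons a b => exact ⟨a, b, rfl⟩
  have hrecon := pvParts_recon cs
  rw [hps] at hrecon
  simp only [List.headD_cons, List.tail_cons] at hrecon
  have hp0 : '\\' ∉ p0 := pvParts_bsfree cs p0 (hps ▸ List.mem_cons_self)
  have hpsbs : ∀ p ∈ ps, '\\' ∉ p := fun p hp => pvParts_bsfree cs p (hps ▸ List.mem_cons_of_mem _ hp)
  rw [hps]
  simp only [List.headD_cons, List.tail_cons]
  have hmain := pvB_main ps hpsbs ((PySem.Chars.count p0 ['"'] : Int)) ((p0.length : Nat) : Int)
      (((PySem.List.enumerate p0 0).filter (fun q => q.2 == '"')).map (fun q => q.1)) false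
      (pvLastOr none p0)
  simp only [hmain]
  set S := (ps.map (fun p => '\\' :: p)).flatten with hS
  -- initial chunk facts
  have hinitpos : ((PySem.List.enumerate p0 0).filter (fun q => q.2 == '"')).map
      (fun q => q.1) = pvPos 0 none p0 := by
    rw [pvPosE_all p0 hp0 0 0 none (by simp)]
    congr 1
    funext x
    ring_nf
  have hiniteff : PySem.Chars.count p0 ['"'] = pvTog false p0 := by
    rw [pvCount_quote, pvTog_false_bsfree p0 hp0]
  -- whole-text facts from the decomposition
  have htogcs : pvTog false cs = pvTog false p0 + pvTog false S := by
    conv_lhs => rw [← hrecon]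
    rw [pvTog_append, pvEsc_false_bsfree p0 hp0]
  have hposcs : pvPos 0 none cs = pvPos 0 none p0 ++ pvPos ((p0.length : Int)) (pvLastOr none p0) S := by
    conv_lhs => rw [← hrecon]
    rw [pvPos_append]
    norm_num
  rw [hinitpos, hiniteff, hposcs, htogcs]
  have heq1 : ((((pvTog false p0 : Int) + (pvTog false S : Int)) % 2 == 1) : Bool)
      = decide ((pvTog false p0 + pvTog false S) % 2 = 1) := by
    have := pvParity (pvTog false p0 + pvTog false S)
    push_cast at this ⊢
    exact this
  simp only [Bool.false_xor, heq1]
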